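-- pv_equiv track=rewrite | github.com/pqhhust/mech-interp-eeg | downstream/bcic2a_dataset.py | _group_by_subject
-- ===== SOURCE A (Python) =====
-- from typing import Dict, List, Optional, Sequence, Tuple
--
-- def _key_to_subject(key: str) -> str:
--     return key.split("-", 1)[0][:3]
--
-- def _group_by_subject(keys: Sequence[str]) -> Tuple[List[str], Dict[str, List[str]]]:
--     tokens, seen, by = [], set(), {}
--     for k in keys:
--         s = _key_to_subject(k)
--         if s not in seen:
--             tokens.append(s)
--             seen.add(s)
--         by.setdefault(s, []).append(k)
--     return tokens, by
-- ===== SOURCE B (Python) =====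
-- from typing import Dict, List, Sequence, Tuple
--
-- def _key_to_subject(key: str) -> str:
--     return key.split("-", 1)[0][:3]
--
-- def _group_by_subject(keys: Sequence[str]) -> Tuple[List[str], Dict[str, List[str]]]:
--     subjects = [_key_to_subject(k) for k in keys]
--     tokens = list(dict.fromkeys(subjects))
--     by = {s: [k for k, t in zip(keys, subjects) if t == s] for s in tokens}
--     return tokens, by
-- ===== Notes on version B (the rewrite author's own statement) =====
-- stated objective: alternative
-- what changed: B replaces A's single stateful pass (seen-set + setdefault-append into a dict) by staged passes: precompute the subject of every key, dedupe that list via dict.fromkeys for the token order, then build each group by filtering the key list per subject; it trades A's O(n) single pass for one filtering pass per distinct subject.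
import Mathlib
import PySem

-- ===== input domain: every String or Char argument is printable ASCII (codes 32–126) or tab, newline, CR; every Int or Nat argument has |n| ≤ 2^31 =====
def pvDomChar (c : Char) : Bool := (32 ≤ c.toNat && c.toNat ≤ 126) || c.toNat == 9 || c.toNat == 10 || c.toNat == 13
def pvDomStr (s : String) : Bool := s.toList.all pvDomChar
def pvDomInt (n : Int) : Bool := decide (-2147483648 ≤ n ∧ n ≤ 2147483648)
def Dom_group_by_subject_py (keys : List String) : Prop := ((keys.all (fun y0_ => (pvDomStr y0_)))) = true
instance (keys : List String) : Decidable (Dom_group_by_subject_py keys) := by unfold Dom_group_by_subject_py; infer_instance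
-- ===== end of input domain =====

-- B replaces A's single stateful pass (seen-set + setdefault into a dict) by staged passes:
-- precompute all subjects, dedupe them for the token order, then build each group by filtering
-- the key list per subject; objective: alternative (same result, different algorithm).

-- ===== PORT A =====
-- key.split("-", 1)[0][:3]; split with a nonempty sep always returns a nonempty list,
-- so the .getD/.headD defaults are never taken.
def keyToSubject (k : String) : String :=
  PySem.Str.slice (((PySem.Str.splitMax? k "-" 1).getD []).headD "") none (some 3)

def group_by_subject_py (keys : List String) : List String × (List (String × List String)) :=
  let st := keys.foldl
    (fun (st : List String × PySem.Set String × PySem.Dict String (List String)) k =>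
      let s := keyToSubject k
      let ts :=
        if PySem.Set.contains st.2.1 s then (st.1, st.2.1)
        else (st.1 ++ [s], PySem.Set.add st.2.1 s)
      (ts.1, ts.2, (st.2.2).modify s [] (fun l => l ++ [k])))
    ([], PySem.Set.empty, PySem.Dict.empty)
  (st.1, st.2.2.items)

-- ===== PORT B =====
-- subjects = [_key_to_subject(k) for k in keys]; tokens = list(dict.fromkeys(subjects));
-- by = {s: [k for k, t in zip(keys, subjects) if t == s] for s in tokens}
def group_by_subject_py_alt (keys : List String) : List String × (List (String × List String)) :=
  let subjects := keys.map keyToSubject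
  let tokens := PySem.List.dedup subjects
  let d := tokens.foldl
    (fun (d : PySem.Dict String (List String)) s =>
      d.insert s (((keys.zip subjects).filter (fun p => p.2 == s)).map (fun p => p.1)))
    PySem.Dict.empty
  (tokens, d.items)

-- ===== PRECONDITION & SPEC =====
def Spec_group_by_subject_py (keys : List String) (out : List String × (List (String × List String))) : Prop := out = group_by_subject_py_alt keys
instance (keys : List String) (out : List String × (List (String × List String))) : Decidable (Spec_group_by_subject_py keys out) := by unfold Spec_group_by_subject_py; infer_instance

-- ===== CLAIM (what is proved, stated in full; the proofs are below) =====
def Claim_equal_group_by_subject_py : Prop := ∀ (keys : List String), Dom_group_by_subject_py keys → Spec_group_by_subject_py keys (group_by_subject_py keys)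

-- ===== LEMMAS AND PROOFS =====

-- Invariant for A's loop: the seen-set equals the tokens list, which equals the keys of the
-- dict so far; hence A's fold is the plain grouping fold with its keys attached.
theorem group_loop_inv (l : List String) (tokens : List String)
    (d : PySem.Dict String (List String)) (ht : tokens = d.keys) :
    l.foldl
      (fun (st : List String × PySem.Set String × PySem.Dict String (List String)) k =>
        let s := keyToSubject k
        let ts :=
          if PySem.Set.contains st.2.1 s then (st.1, st.2.1)
          else (st.1 ++ [s], PySem.Set.add st.2.1 s)
        (ts.1, ts.2, (st.2.2).modify s [] (fun l => l ++ [k])))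
      (tokens, tokens, d)
    = (let d' := l.foldl
        (fun (d : PySem.Dict String (List String)) k =>
          d.modify (keyToSubject k) [] (fun l => l ++ [k])) d
       (d'.keys, d'.keys, d')) := by
  induction l generalizing tokens d with
  | nil => simpa using ht
  | cons k t ih =>
    simp only [List.foldl_cons]
    by_cases hmem : keyToSubject k ∈ tokens
    · have hc : PySem.Set.contains tokens (keyToSubject k) = true :=
        (PySem.Set.contains_iff _ _).mpr hmem
      have hdc : d.contains (keyToSubject k) = true :=
        (PySem.Dict.contains_iff_mem_keys _ _).mpr (ht ▸ hmem)
      have hkeys : (d.modify (keyToSubject k) [] (fun l => l ++ [k])).keys = d.keys := by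
        simp [PySem.Dict.keys_modify, PySem.Dict.keys_insert_of_contains, hdc]
      simp only [hc, if_true]
      exact ih tokens _ (by rw [hkeys, ht])
    · have hc : PySem.Set.contains tokens (keyToSubject k) = false := by
        rw [← Bool.not_eq_true]; simp [PySem.Set.contains_iff, hmem]
      have hdc : d.contains (keyToSubject k) = false := by
        rw [← Bool.not_eq_true]
        intro h
        exact hmem (ht ▸ (PySem.Dict.contains_iff_mem_keys _ _).mp h)
      have hkeys : (d.modify (keyToSubject k) [] (fun l => l ++ [k])).keys
          = d.keys ++ [keyToSubject k] := by
        simp [PySem.Dict.keys_modify, PySem.Dict.keys_insert_of_not_contains, hdc]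
      have hadd : PySem.Set.add tokens (keyToSubject k) = tokens ++ [keyToSubject k] :=
        PySem.Set.add_of_not_mem hmem
      simp only [hc, Bool.false_eq_true, if_false, hadd]
      exact ih (tokens ++ [keyToSubject k]) _ (by rw [hkeys, ht])

-- A's grouping dict, looked up at any subject, is the per-subject filter of the key list.
theorem groupA_getD (keys : List String) (s : String) :
    (keys.foldl
      (fun (d : PySem.Dict String (List String)) k =>
        d.modify (keyToSubject k) [] (fun l => l ++ [k])) PySem.Dict.empty).getD s []
    = (keys.filter (fun k => keyToSubject k == s)) := by
  have h := PySem.Dict.getD_foldl_modify_append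
    (keys.map (fun k => (keyToSubject k, k))) (PySem.Dict.empty (κ := String) (ν := List String)) s
  rw [List.foldl_map, List.filter_map, List.map_map] at h
  simpa [Function.comp_def] using h

theorem group_by_subject_py_eq_alt (keys : List String) :
    group_by_subject_py keys = group_by_subject_py_alt keys := by
  unfold group_by_subject_py group_by_subject_py_alt
  rw [show (PySem.Set.empty : PySem.Set String) = ([] : List String) from rfl]
  rw [group_loop_inv keys [] PySem.Dict.empty rfl]
  simp only []
  set dA := keys.foldl
    (fun (d : PySem.Dict String (List String)) k =>
      d.modify (keyToSubject k) [] (fun l => l ++ [k])) PySem.Dict.empty with hdA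
  have hkeysA : dA.keys = PySem.List.dedup (keys.map keyToSubject) := by
    rw [hdA, PySem.Dict.keys_foldl_modify_key keys keyToSubject []
      (fun _ k => fun l => l ++ [k]) PySem.Dict.empty]
    simp [PySem.List.dedup_eq_ofList, PySem.Set.update, PySem.Set.ofList_eq_foldl,
      PySem.Dict.keys_empty]
  have hnodup : dA.keys.Nodup :=
    hdA ▸ PySem.Dict.nodup_keys_foldl_modify_key keys keyToSubject []
      (fun _ k => fun l => l ++ [k]) PySem.Dict.empty (by simp)
  have hzip : keys.zip (keys.map keyToSubject) = keys.map (fun k => (k, keyToSubject k)) :=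
    (List.map_prod_left_eq_zip (l := keys) (f := keyToSubject)).symm
  have hfresh : ∀ s ∈ PySem.List.dedup (keys.map keyToSubject),
      (PySem.Dict.empty (κ := String) (ν := List String)).contains s = false := by
    intro s _; simp [PySem.Dict.contains_empty]
  have hnodupTok : (PySem.List.dedup (keys.map keyToSubject)).Nodup :=
    PySem.List.nodup_dedup _
  have hB := PySem.Dict.items_foldl_insert_fresh
    (PySem.List.dedup (keys.map keyToSubject)) (fun s => s)
    (fun s => (((keys.zip (keys.map keyToSubject)).filter (fun p => p.2 == s)).map (fun p => p.1)))
    PySem.Dict.empty hfresh (by simpa using hnodupTok)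
  rw [hB]
  have hitemsA := PySem.Dict.items_eq_map_keys dA hnodup []
  rw [hitemsA, hkeysA]
  simp only [List.nil_append]
  congr 1
  apply List.map_congr_left
  intro s _
  rw [groupA_getD keys s, hzip, List.filter_map, List.map_map]
  simp [Function.comp_def]

-- ===== VERDICT (by name: the statement is the Claim_ definition above) =====
theorem group_by_subject_py_spec : Claim_equal_group_by_subject_py := by
  intro keys _
  unfold Spec_group_by_subject_py
  exact group_by_subject_py_eq_alt keys
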